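-- pv_equiv track=rewrite | github.com/neilrussell6/tezos-playground | vendor/SmartPyBasic/smartpyio.py | compressMichelson
-- ===== SOURCE A (Python) =====
-- def compressMichelson(lines):
--     result = []
--     inSeq = False
--     for line in lines:
--         row = line.split()
--         seqOK = "{" not in line and "}" not in line and row[-1][-1] == ';' and not row[0].startswith('parameter') and not row[0].startswith('storage')
--         if inSeq and seqOK:
--             result[-1] += " " + ' '.join(row)
--         else:
--             result.append(line)
--             inSeq = seqOK
--     return result
-- ===== SOURCE B (Python) =====
-- def compressMichelson(lines):
--     # Key fact: a line is merged into the previous output entry iff both it and the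
--     # first line of its group satisfy seqOK, so the output groups are exactly the
--     # maximal runs of consecutive seqOK lines (each non-seqOK line stands alone).
--     def seq_ok(line):
--         row = line.split()
--         return ("{" not in line and "}" not in line and row[-1][-1] == ';'
--                 and not row[0].startswith('parameter') and not row[0].startswith('storage'))
--     flags = [seq_ok(l) for l in lines]
--     result = []
--     i, n = 0, len(lines)
--     while i < n:
--         if flags[i]:
--             j = i + 1
--             while j < n and flags[j]:
--                 j += 1
--             merged = lines[i]
--             for l in lines[i + 1:j]:
--                 merged += ' ' + ' '.join(l.split())
--             result.append(merged)
--             i = j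
--         else:
--             result.append(lines[i])
--             i += 1
--     return result
-- ===== Notes on version B (the rewrite author's own statement) =====
-- stated objective: alternative
-- what changed: A threads an inSeq flag through one loop and mutates result[-1] to merge; B instead observes that output groups are exactly the maximal runs of consecutive seqOK lines, precomputes the seqOK flags, and scans runs with a two-index loop (i,j), emitting one joined line per run and each non-seqOK line alone, with no merge state.
import Mathlib
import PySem

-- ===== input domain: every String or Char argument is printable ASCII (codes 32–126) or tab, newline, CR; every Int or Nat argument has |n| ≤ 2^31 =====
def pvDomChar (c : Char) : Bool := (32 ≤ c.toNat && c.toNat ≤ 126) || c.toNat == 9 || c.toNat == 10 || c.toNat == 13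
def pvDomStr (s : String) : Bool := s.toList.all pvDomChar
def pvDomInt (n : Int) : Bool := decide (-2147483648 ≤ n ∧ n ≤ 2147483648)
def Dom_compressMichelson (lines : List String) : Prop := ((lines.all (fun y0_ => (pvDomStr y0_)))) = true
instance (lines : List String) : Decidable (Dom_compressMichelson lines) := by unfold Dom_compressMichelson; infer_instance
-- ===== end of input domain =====

-- B replaces A's stateful in-place merge by run detection: it precomputes the seqOK flags and
-- emits one output line per maximal run of consecutive seqOK lines (objective: alternative, same cost).


-- ===== PORT A =====
-- A's loop body as a named step over the state (result, inSeq); 'result[-1] += …' becomes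
-- dropLast ++ [last ++ …].  The getLastD/headD defaults are reached only when line.split()
-- is empty, i.e. exactly outside Pre_ (where Python raises IndexError).
def pvStepA (st : List String × Bool) (line : String) : List String × Bool :=
  let result := st.1
  let inSeq := st.2
  let row := PySem.Str.split₀ line
  let seqOK :=
    !(PySem.Str.isIn "{" line) && !(PySem.Str.isIn "}" line) &&
    ((row.getLastD "").toList.getLastD ' ' == ';') &&
    !(PySem.Str.startswith (row.headD "") "parameter") &&
    !(PySem.Str.startswith (row.headD "") "storage")
  if inSeq && seqOK then
    (result.dropLast ++ [result.getLastD "" ++ " " ++ PySem.Str.join " " row], inSeq)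
  else
    (result ++ [line], seqOK)

def compressMichelson (lines : List String) : List String :=
  (lines.foldl pvStepA ([], false)).1

-- ===== PORT B =====
-- B's helper seq_ok (same default convention as in A's port: only reached outside Pre_).
def pvSeqOk (line : String) : Bool :=
  let row := PySem.Str.split₀ line
  !(PySem.Str.isIn "{" line) && !(PySem.Str.isIn "}" line) &&
  ((row.getLastD "").toList.getLastD ' ' == ';') &&
  !(PySem.Str.startswith (row.headD "") "parameter") &&
  !(PySem.Str.startswith (row.headD "") "storage")

-- B's "merged += ' ' + ' '.join(l.split())" accumulation over the tail of a run.
def pvMerge (m : String) (l : String) : String :=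
  m ++ " " ++ PySem.Str.join " " (PySem.Str.split₀ l)

-- B's outer while loop: the inner flag scan 'while j < n and flags[j]' is takeWhile/dropWhile
-- on the (line, flag) pairs, and the run is rendered by folding pvMerge over its tail.
def pvGo : List (String × Bool) → List String
  | [] => []
  | (l, b) :: rest =>
      if b then
        ((rest.takeWhile (·.2)).foldl (fun m p => pvMerge m p.1) l)
          :: pvGo (rest.dropWhile (·.2))
      else l :: pvGo rest
  termination_by xs => xs.length
  decreasing_by
    · exact Nat.lt_succ_of_le (List.length_dropWhile_le _ _)
    · simp

def compressMichelson_alt (lines : List String) : List String :=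
  pvGo (lines.map (fun l => (l, pvSeqOk l)))

-- ===== PRECONDITION & SPEC =====
-- Pre_ excludes inputs containing a whitespace-only line (whose split yields no words): both A and B
-- raise IndexError on row[-1] there (such a line can contain no brace, so the short-circuit
-- never saves it).
def Pre_compressMichelson (lines : List String) : Prop :=
  ∀ line ∈ lines, PySem.Str.split₀ line ≠ []
instance (lines : List String) : Decidable (Pre_compressMichelson lines) := by
  unfold Pre_compressMichelson; infer_instance

def pvWitness_compressMichelson : List String :=
  ["parameter unit;", "code {", "PUSH int 1;", "  ADD ;", "}"]

def Spec_compressMichelson (lines : List String) (out : List String) : Prop := out = compressMichelson_alt lines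
instance (lines : List String) (out : List String) : Decidable (Spec_compressMichelson lines out) := by unfold Spec_compressMichelson; infer_instance

-- ===== CLAIM (what is proved, stated in full; the proofs are below) =====
def Claim_equal_compressMichelson : Prop := ∀ (lines : List String), Dom_compressMichelson lines → Pre_compressMichelson lines → Spec_compressMichelson lines (compressMichelson lines)

-- ===== LEMMAS AND PROOFS =====

-- The seqOK expression inside A's step is exactly B's pvSeqOk.
theorem pvStepA_eq (st : List String × Bool) (line : String) :
    pvStepA st line =
      if st.2 && pvSeqOk line then
        (st.1.dropLast ++ [st.1.getLastD "" ++ " " ++ PySem.Str.join " " (PySem.Str.split₀ line)], st.2)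
      else (st.1 ++ [line], pvSeqOk line) := rfl

-- pairs abbreviation
def pvPairs (lines : List String) : List (String × Bool) :=
  lines.map (fun l => (l, pvSeqOk l))

-- The joint invariant, by strong induction on the length of the remaining lines:
-- (P) from an (acc, false) state A's fold appends exactly pvGo of the pairs;
-- (Q) from an (acc ++ [last], true) state A's fold first extends `last` across the
--     leading run of seqOK lines and then continues as in (P).
theorem pvMain : ∀ (n : ℕ) (lines : List String), lines.length ≤ n →
    (∀ acc, (lines.foldl pvStepA (acc, false)).1 = acc ++ pvGo (pvPairs lines)) ∧
    (∀ acc last, (lines.foldl pvStepA (acc ++ [last], true)).1 =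
      acc ++ ((lines.takeWhile pvSeqOk).foldl pvMerge last)
          :: pvGo (pvPairs (lines.dropWhile pvSeqOk))) := by
  intro n
  induction n with
  | zero =>
      intro lines h
      have : lines = [] := List.eq_nil_of_length_eq_zero (Nat.le_zero.mp h)
      subst this
      constructor
      · intro acc; simp [pvPairs, pvGo]
      · intro acc last; simp [pvPairs, pvGo]
  | succ n ih =>
      intro lines h
      cases lines with
      | nil =>
          constructor
          · intro acc; simp [pvPairs, pvGo]
          · intro acc last; simp [pvPairs, pvGo]
      | cons l rest =>
          have hrest : rest.length ≤ n := Nat.lt_succ_iff.mp (by simpa using h)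
          constructor
          · intro acc
            rw [List.foldl_cons, pvStepA_eq]
            simp only [Bool.false_and, if_neg Bool.false_ne_true]
            by_cases hok : pvSeqOk l = true
            · rw [hok]
              have hq := (ih rest hrest).2 acc l
              rw [hq]
              simp only [pvPairs, List.map_cons, pvGo, hok, if_true]
              congr 2
              · rw [List.takeWhile_map, List.foldl_map]
                rfl
              · rw [List.dropWhile_map]
                rfl
            · rw [Bool.not_eq_true] at hok
              rw [hok]
              have hp := (ih rest hrest).1 (acc ++ [l])
              rw [hp]
              simp [pvPairs, pvGo, hok]
          · intro acc last
            rw [List.foldl_cons, pvStepA_eq]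
            by_cases hok : pvSeqOk l = true
            · simp only [hok, Bool.and_true, if_true, List.dropLast_concat,
                List.getLastD_concat]
              have hq := (ih rest hrest).2 acc (last ++ " " ++ PySem.Str.join " " (PySem.Str.split₀ l))
              rw [hq]
              simp [hok, pvMerge]
            · rw [Bool.not_eq_true] at hok
              simp only [hok, Bool.and_false, if_neg Bool.false_ne_true]
              have hp := (ih rest hrest).1 ((acc ++ [last]) ++ [l])
              rw [hp]
              simp [hok, pvPairs, pvGo]

-- ===== VERDICT (by name: the statement is the Claim_ definition above) =====
theorem compressMichelson_spec : Claim_equal_compressMichelson := by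
  intro lines _ _
  unfold Spec_compressMichelson compressMichelson compressMichelson_alt
  have h := (pvMain lines.length lines le_rfl).1 []
  simpa [pvPairs] using h
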